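-- pv_equiv track=rewrite | github.com/aanhtran01/SpectrumAssembler | euleriangenomeassembly.py | _double_suffix_sort
-- ===== SOURCE A (Python) =====
-- def _double_suffix_sort(S, L, arrangement, class_characters):
--     # Method that sorts the doubled suffixes
--     string_length = len(S)
--     num = [0] * string_length
--     new_arrangement = [0] * string_length
--
--     # Count the occurrences of each class in the first half of the doubled suffixes
--     for i in range(string_length):
--         num[class_characters[i]] = num[class_characters[i]] + 1
--
--     # Compute the starting position of each class in the sorted arrangement
--     for j in range(1, string_length):
--         num[j] = num[j] + num[j-1]
--
--     # Sort the doubled suffixes based on their second half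
--     for i in range(string_length-1, -1, -1):
--         start = (arrangement[i]-L+string_length) % string_length
--         cl = class_characters[start]
--         num[cl] = num[cl] - 1
--         new_arrangement[num[cl]] = start
--
--     return new_arrangement
-- ===== SOURCE B (Python) =====
-- def _double_suffix_sort(S, L, arrangement, class_characters):
--     # Bucket-collect instead of counting sort: one forward pass drops each
--     # shifted start into the bucket of its class, then the buckets are
--     # concatenated in class order.  Stable, same result on valid inputs.
--     string_length = len(S)
--     buckets = [[] for _ in range(string_length)]
--     for i in range(string_length):
--         start = (arrangement[i] - L) % string_length
--         buckets[class_characters[start]].append(start)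
--     return [start for bucket in buckets for start in bucket]
-- ===== Notes on version B (the rewrite author's own statement) =====
-- stated objective: simpler
-- what changed: Replaced the three-pass counting sort (count occurrences, prefix-sum, backward scatter into a preallocated array) by a single forward bucket-collect pass that appends each shifted start to the bucket of its class and concatenates the buckets in class order.
-- outside the precondition, e.g. on _double_suffix_sort('aaa', 0, [0, 0, 1], [0, 0, 1]): A returns [0, 1, 0], B returns [0, 0, 1]; on _double_suffix_sort('c1', 0, [1, 1, 1], [1, 0, 1]): A returns [1, 1], B returns [1, 1]
import Mathlib
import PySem

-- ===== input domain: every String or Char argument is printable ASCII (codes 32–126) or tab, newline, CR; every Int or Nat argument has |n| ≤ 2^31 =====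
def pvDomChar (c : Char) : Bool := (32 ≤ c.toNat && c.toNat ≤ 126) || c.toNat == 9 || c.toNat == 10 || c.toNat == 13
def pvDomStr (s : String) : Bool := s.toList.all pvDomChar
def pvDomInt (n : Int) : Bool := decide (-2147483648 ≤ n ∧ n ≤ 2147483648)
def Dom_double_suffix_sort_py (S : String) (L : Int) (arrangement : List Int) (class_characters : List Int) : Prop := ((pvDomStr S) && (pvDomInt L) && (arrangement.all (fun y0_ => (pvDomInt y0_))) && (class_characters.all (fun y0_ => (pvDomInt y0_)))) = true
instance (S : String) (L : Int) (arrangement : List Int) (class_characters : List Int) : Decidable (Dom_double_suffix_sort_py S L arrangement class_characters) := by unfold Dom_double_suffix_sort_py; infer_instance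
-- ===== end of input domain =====

-- B replaces A's three-pass counting sort (count, prefix-sum, backward scatter)
-- by a single forward bucket-collect pass: each shifted start is appended to the
-- bucket of its class and the buckets are concatenated in class order.
-- Equivalence is claimed on the routine's natural domain (Pre_ below).

-- ===== PORT A =====
def double_suffix_sort_py (S : String) (L : Int) (arrangement : List Int) (class_characters : List Int) : List Int :=
  let string_length : Int := PySem.Str.len S
  -- num = [0] * string_length ; new_arrangement = [0] * string_length
  let num0 : List Int := List.replicate string_length.toNat 0
  let new_arrangement0 : List Int := List.replicate string_length.toNat 0
  -- for i in range(string_length): num[class_characters[i]] += 1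
  let num1 : List Int := (PySem.List.pyRange 0 string_length 1).foldl (fun num i =>
    PySem.List.pySetD num (PySem.List.pyGetD class_characters i 0)
      (PySem.List.pyGetD num (PySem.List.pyGetD class_characters i 0) 0 + 1)) num0
  -- for j in range(1, string_length): num[j] = num[j] + num[j-1]
  let num2 : List Int := (PySem.List.pyRange 1 string_length 1).foldl (fun num j =>
    PySem.List.pySetD num j (PySem.List.pyGetD num j 0 + PySem.List.pyGetD num (j - 1) 0)) num1
  -- for i in range(string_length-1, -1, -1): start = (arrangement[i]-L+string_length) % string_length;
  --   cl = class_characters[start]; num[cl] -= 1; new_arrangement[num[cl]] = start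
  let res := (PySem.List.pyRange (string_length - 1) (-1) (-1)).foldl (fun p i =>
    let start := PySem.Int.mod (PySem.List.pyGetD arrangement i 0 - L + string_length) string_length
    let cl := PySem.List.pyGetD class_characters start 0
    let num' := PySem.List.pySetD p.1 cl (PySem.List.pyGetD p.1 cl 0 - 1)
    (num', PySem.List.pySetD p.2 (PySem.List.pyGetD num' cl 0) start)) (num2, new_arrangement0)
  res.2

-- ===== PORT B =====
def double_suffix_sort_py_alt (S : String) (L : Int) (arrangement : List Int) (class_characters : List Int) : List Int :=
  let string_length : Int := PySem.Str.len S
  -- buckets = [[] for _ in range(string_length)]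
  let buckets0 : List (List Int) := List.replicate string_length.toNat []
  -- for i in range(string_length): start = (arrangement[i]-L) % string_length;
  --   buckets[class_characters[start]].append(start)
  let buckets : List (List Int) := (PySem.List.pyRange 0 string_length 1).foldl (fun bs i =>
    let start := PySem.Int.mod (PySem.List.pyGetD arrangement i 0 - L) string_length
    let cl := PySem.List.pyGetD class_characters start 0
    PySem.List.pySetD bs cl (PySem.List.pyGetD bs cl [] ++ [start])) buckets0
  -- [start for bucket in buckets for start in bucket]
  buckets.foldl (fun acc bucket => acc ++ bucket) []

-- ===== PRECONDITION & SPEC =====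
-- string length as a Nat (helper shared by Pre_ and the proofs)
def pvN (S : String) : Nat := S.length
-- the (wrapped) class of each shifted doubled-suffix start, as the Python computes it
def pvKsI (S : String) (L : Int) (arrangement : List Int) (class_characters : List Int) : List Int :=
  (arrangement.take S.length).map (fun a =>
    PySem.Int.mod (class_characters.getD (PySem.Int.mod (a - L) S.length).toNat 0) S.length)

-- Pre_ is the routine's natural domain.  Besides the index-validity A needs to return at all
-- (lists of length ≥ len(S), classes legal Python indices into num), it restricts to inputs
-- whose arrangement enumerates the doubled-suffix starts consistently with the class tallies
-- (for every occurring class value, as many starts with class ≤ k as positions with class ≤ k) —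
-- the invariant suffix-array construction guarantees.  Outside it A still returns, but its
-- counting-sort cursors run past their buckets and the result mixes leftover zeros with
-- overwritten slots (see the cited examples in the header).
def Pre_double_suffix_sort_py (S : String) (L : Int) (arrangement : List Int) (class_characters : List Int) : Prop :=
  pvN S ≤ arrangement.length ∧ pvN S ≤ class_characters.length ∧
    (∀ i < pvN S, -(pvN S : Int) ≤ class_characters.getD i 0 ∧ class_characters.getD i 0 < (pvN S : Int)) ∧
    ∀ k ∈ pvKsI S L arrangement class_characters,
      (class_characters.take S.length).countP (PySem.Int.mod · S.length ≤ k)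
        = (pvKsI S L arrangement class_characters).countP (· ≤ k)
instance (S : String) (L : Int) (arrangement : List Int) (class_characters : List Int) : Decidable (Pre_double_suffix_sort_py S L arrangement class_characters) := by unfold Pre_double_suffix_sort_py; infer_instance

def pvWitness_double_suffix_sort_py : String × Int × List Int × List Int := ("ab", 0, [0, 1], [0, 1])

def Spec_double_suffix_sort_py (S : String) (L : Int) (arrangement : List Int) (class_characters : List Int) (out : List Int) : Prop := out = double_suffix_sort_py_alt S L arrangement class_characters
instance (S : String) (L : Int) (arrangement : List Int) (class_characters : List Int) (out : List Int) : Decidable (Spec_double_suffix_sort_py S L arrangement class_characters out) := by unfold Spec_double_suffix_sort_py; infer_instance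

-- ===== CLAIM (what is proved, stated in full; the proofs are below) =====
def Claim_equal_double_suffix_sort_py : Prop := ∀ (S : String) (L : Int) (arrangement : List Int) (class_characters : List Int), Dom_double_suffix_sort_py S L arrangement class_characters → Pre_double_suffix_sort_py S L arrangement class_characters → Spec_double_suffix_sort_py S L arrangement class_characters (double_suffix_sort_py S L arrangement class_characters)

-- ===== LEMMAS AND PROOFS =====

def pvKey (S : String) (cc : List Int) (s : Int) : Nat :=
  (PySem.Int.mod (cc.getD s.toNat 0) ((pvN S : Nat) : Int)).toNat
def pvSf (S : String) (L : Int) (arr : List Int) (i : Nat) : Int :=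
  PySem.Int.mod (arr.getD i 0 - L) ((pvN S : Nat) : Int)
def pvPcnt (S : String) (cc : List Int) (v : Nat) : Nat :=
  (List.range (pvN S)).countP (fun (i : Nat) => pvKey S cc (i : Int) == v)
def pvKcnt (S : String) (cc : List Int) (v : Nat) (l : List Int) : Nat :=
  l.countP (fun s => pvKey S cc s == v)
def pvCum (S : String) (cc : List Int) (v : Nat) : Nat :=
  ((List.range (v + 1)).map (pvPcnt S cc)).sum
def pvChunk (S : String) (cc : List Int) (m : Nat → Nat) (l : List Int) (v : Nat) : List Int :=
  List.replicate (m v - pvKcnt S cc v l) 0 ++ l.filter (fun s => pvKey S cc s == v)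


theorem pv_map_range_set {α : Type} (m κ : Nat) (g : Nat → α) (x : α) :
    ((List.range m).map g).set κ x = (List.range m).map (fun v => if v = κ then x else g v) := by
  apply List.ext_getElem
  · simp
  · intro i h1 h2
    simp only [List.getElem_set, List.getElem_map, List.getElem_range]
    simp only [List.length_set, List.length_map, List.length_range] at h1
    by_cases h : κ = i <;> simp [h]
    omega

theorem pv_map_range_getD {α : Type} (m κ : Nat) (g : Nat → α) (d : α) (hκ : κ < m) :
    ((List.range m).map g).getD κ d = g κ := by
  rw [List.getD_eq_getElem?_getD]
  simp [hκ]

theorem pv_map_range_congr {α : Type} (m : Nat) (g g' : Nat → α) (h : ∀ v < m, g v = g' v) :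
    (List.range m).map g = (List.range m).map g' := by
  apply List.map_congr_left
  intro v hv
  exact h v (List.mem_range.mp hv)

theorem pv_idx (m : Nat) (c : Int) (hm : 0 < m) (h1 : -(m : Int) ≤ c) (h2 : c < m) :
    PySem.List.pyIdx? m c = some (PySem.Int.mod c m).toNat := by
  rw [PySem.Int.mod_eq_emod_of_pos (by exact_mod_cast hm)]
  unfold PySem.List.pyIdx?
  by_cases h : 0 ≤ c
  · rw [if_pos h, if_pos h2]
    congr 1
    rw [Int.emod_eq_of_lt h h2]
  · rw [if_neg h, if_pos h1]
    congr 1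
    have hc : c % (m : Int) = c + m := by
      have h3 : (c + m) % (m : Int) = c % m := by
        simpa using Int.add_mul_emod_self_left (a := c) (b := 1) (c := (m : Int))
      rw [← h3, Int.emod_eq_of_lt (by omega) (by omega)]
    omega

theorem pv_wrap_get {α : Type} [Inhabited α] (xs : List α) (m : Nat) (c : Int) (d : α)
    (hlen : xs.length = m) (hm : 0 < m) (h1 : -(m : Int) ≤ c) (h2 : c < m) :
    PySem.List.pyGetD xs c d = xs.getD (PySem.Int.mod c m).toNat d := by
  simp [PySem.List.pyGetD, PySem.List.pyGet?, hlen, pv_idx m c hm h1 h2, List.getD_eq_getElem?_getD]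

theorem pv_wrap_set {α : Type} (xs : List α) (m : Nat) (c : Int) (x : α)
    (hlen : xs.length = m) (hm : 0 < m) (h1 : -(m : Int) ≤ c) (h2 : c < m) :
    PySem.List.pySetD xs c x = xs.set (PySem.Int.mod c m).toNat x := by
  simp [PySem.List.pySetD, PySem.List.pySet?, hlen, pv_idx m c hm h1 h2]

theorem pv_mod_toNat_lt (c : Int) (m : Nat) (hm : 0 < m) : (PySem.Int.mod c m).toNat < m := by
  have h1 := PySem.Int.mod_lt c (b := (m : Int)) (by exact_mod_cast hm)
  have h2 := PySem.Int.mod_nonneg c (b := (m : Int)) (by exact_mod_cast hm)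
  omega

theorem pv_mod_add_self (x : Int) (m : Nat) (hm : 0 < m) :
    PySem.Int.mod (x + m) m = PySem.Int.mod x m := by
  rw [PySem.Int.mod_eq_emod_of_pos (by exact_mod_cast hm),
      PySem.Int.mod_eq_emod_of_pos (by exact_mod_cast hm)]
  simpa using Int.add_mul_emod_self_left (a := x) (b := 1) (c := (m : Int))

theorem pv_flatMap_replicate (m : Nat) (f : Nat → Nat) :
    (List.range m).flatMap (fun v => List.replicate (f v) (0 : Int))
      = List.replicate (((List.range m).map f).sum) 0 := by
  induction m with
  | zero => simp
  | succ k ih =>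
      rw [List.range_succ]
      simp only [List.flatMap_append, List.map_append, List.sum_append, ih]
      simp [List.replicate_append_replicate]

theorem pv_replicate_set (R : Nat) (hR : 0 < R) (s : Int) (filt : List Int) :
    (List.replicate R (0 : Int) ++ filt).set (R - 1) s
      = List.replicate (R - 1) 0 ++ s :: filt := by
  have h : R = (R - 1) + 1 := by omega
  rw [h]
  simp [List.replicate_succ', List.append_assoc]

theorem pv_set_append_right {α : Type} (A B : List α) (t : Nat) (x : α) :
    (A ++ B).set (A.length + t) x = A ++ B.set t x := by
  induction A with
  | nil => simp
  | cons a A ih => simpa [Nat.succ_add] using ih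

theorem pvKey_natCast (S : String) (cc : List Int) (p : Nat) :
    pvKey S cc (p : Int) = (PySem.Int.mod (cc.getD p 0) ((pvN S : Nat) : Int)).toNat := by
  simp [pvKey]

theorem pv_count_loop (S : String) (cc : List Int)
    (hn : 0 < pvN S)
    (hcl : ∀ i < pvN S, -(pvN S : Int) ≤ cc.getD i 0 ∧ cc.getD i 0 < (pvN S : Int)) :
    ∀ (ps : List Nat) (g : Nat → Int), (∀ p ∈ ps, p < pvN S) →
      ps.foldl (fun (num : List Int) (p : Nat) => PySem.List.pySetD num (PySem.List.pyGetD cc (p : Int) 0)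
          (PySem.List.pyGetD num (PySem.List.pyGetD cc (p : Int) 0) 0 + 1))
        ((List.range (pvN S)).map g)
      = (List.range (pvN S)).map
          (fun v => g v + (ps.countP (fun (p : Nat) => pvKey S cc (p : Int) == v) : Int)) := by
  intro ps
  induction ps with
  | nil => intro g _; simp
  | cons p ps ih =>
      intro g hmem
      have hp : p < pvN S := hmem p (by simp)
      have hc := hcl p hp
      have hgd : PySem.List.pyGetD cc (p : Int) 0 = cc.getD p 0 := by simp
      rw [List.foldl_cons]
      simp only [hgd]
      rw [pv_wrap_get _ (pvN S) _ _ (by simp) hn hc.1 hc.2,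
        pv_wrap_set _ (pvN S) _ _ (by simp) hn hc.1 hc.2,
        pv_map_range_getD _ _ _ _ (pv_mod_toNat_lt _ _ hn),
        pv_map_range_set,
        ih _ (fun q hq => hmem q (by simp [hq]))]
      apply pv_map_range_congr
      intro v hv
      simp only [List.countP_cons, pvKey_natCast]
      by_cases h : (PySem.Int.mod (cc.getD p 0) ((pvN S : Nat) : Int)).toNat = v
      · rw [h]
        simp
        omega
      · have hb : ((PySem.Int.mod (cc.getD p 0) ((pvN S : Nat) : Int)).toNat == v) = false :=
          beq_eq_false_iff_ne.mpr h
        rw [if_neg (fun hh => h hh.symm), hb]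
        simp

theorem pv_cum_loop (S : String) (c : Nat → Int) (hn : 0 < pvN S) :
    ∀ j, j ≤ pvN S →
      (PySem.List.pyRange 1 (j : Int) 1).foldl
        (fun num jj => PySem.List.pySetD num jj
          (PySem.List.pyGetD num jj 0 + PySem.List.pyGetD num (jj - 1) 0))
        ((List.range (pvN S)).map c)
      = (List.range (pvN S)).map
          (fun v => if v + 1 ≤ j then ((List.range (v + 1)).map c).sum else c v) := by
  intro j
  induction j with
  | zero => rw [PySem.List.pyRange_one_eq_nil (by norm_num)]; simp
  | succ j ih =>
      intro hj
      by_cases hj0 : j = 0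
      · subst hj0
        rw [show ((0 + 1 : Nat) : Int) = 1 by norm_num,
          PySem.List.pyRange_one_eq_nil (by norm_num), List.foldl_nil]
        apply pv_map_range_congr
        intro v hv
        by_cases hv0 : v = 0
        · subst hv0; simp
        · simp [hv0]
      · have hj1 : (1 : Int) ≤ (j : Int) := by exact_mod_cast Nat.one_le_iff_ne_zero.mpr hj0
        rw [show ((j + 1 : Nat) : Int) = (j : Int) + 1 by push_cast; ring,
          PySem.List.pyRange_one_succ_right hj1, List.foldl_append, ih (by omega)]
        simp only [List.foldl_cons, List.foldl_nil]
        have hjn : j < pvN S := by omega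
        have hj1' : 1 ≤ j := by omega
        rw [show ((j : Int) - 1) = ((j - 1 : Nat) : Int) by omega]
        simp only [PySem.List.pyGetD_natCast]
        rw [pv_map_range_getD _ _ _ _ hjn,
          pv_map_range_getD _ _ _ _ (by omega : j - 1 < pvN S),
          PySem.List.pySetD_natCast, pv_map_range_set]
        apply pv_map_range_congr
        intro v hv
        by_cases hvj : v = j
        · subst hvj
          rw [if_pos rfl, if_neg (by omega), if_pos (by omega), if_pos (by omega)]
          rw [show v - 1 + 1 = v from by omega, List.range_succ]
          simp [add_comm]
        · rw [if_neg hvj]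
          by_cases hlt : v + 1 ≤ j
          · rw [if_pos hlt, if_pos (by omega)]
          · rw [if_neg hlt, if_neg (by omega)]

theorem pv_pyGetD_nonneg {α : Type} [Inhabited α] (xs : List α) (s : Int) (d : α) (hs : 0 ≤ s) :
    PySem.List.pyGetD xs s d = xs.getD s.toNat d := by
  conv_lhs => rw [← Int.toNat_of_nonneg hs]
  rw [PySem.List.pyGetD_natCast]

theorem pv_sf_nonneg (S : String) (L : Int) (arr : List Int) (hn : 0 < pvN S) (i : Nat) :
    0 ≤ pvSf S L arr i := PySem.Int.mod_nonneg _ (by exact_mod_cast hn)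

theorem pv_sf_lt (S : String) (L : Int) (arr : List Int) (hn : 0 < pvN S) (i : Nat) :
    pvSf S L arr i < (pvN S : Int) := PySem.Int.mod_lt _ (by exact_mod_cast hn)

theorem pv_bucket_loop (S : String) (L : Int) (arr cc : List Int)
    (hn : 0 < pvN S)
    (hcl : ∀ i < pvN S, -(pvN S : Int) ≤ cc.getD i 0 ∧ cc.getD i 0 < (pvN S : Int)) :
    ∀ (ps : List Nat) (g : Nat → List Int), (∀ p ∈ ps, p < pvN S) →
      ps.foldl (fun (bs : List (List Int)) (p : Nat) =>
          PySem.List.pySetD bs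
            (PySem.List.pyGetD cc (PySem.Int.mod (PySem.List.pyGetD arr (p : Int) 0 - L) ((pvN S : Nat) : Int)) 0)
            (PySem.List.pyGetD bs
              (PySem.List.pyGetD cc (PySem.Int.mod (PySem.List.pyGetD arr (p : Int) 0 - L) ((pvN S : Nat) : Int)) 0) []
              ++ [PySem.Int.mod (PySem.List.pyGetD arr (p : Int) 0 - L) ((pvN S : Nat) : Int)]))
        ((List.range (pvN S)).map g)
      = (List.range (pvN S)).map
          (fun v => g v ++ (ps.map (pvSf S L arr)).filter (fun s => pvKey S cc s == v)) := by
  intro ps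
  induction ps with
  | nil => intro g _; simp
  | cons p ps ih =>
      intro g hmem
      have hp : p < pvN S := hmem p (by simp)
      have hs0 : 0 ≤ pvSf S L arr p := pv_sf_nonneg S L arr hn p
      have hsn : pvSf S L arr p < (pvN S : Int) := pv_sf_lt S L arr hn p
      have hsf : PySem.Int.mod (PySem.List.pyGetD arr (p : Int) 0 - L) ((pvN S : Nat) : Int)
          = pvSf S L arr p := by simp [pvSf]
      have hstn : (pvSf S L arr p).toNat < pvN S := by omega
      have hcs := hcl _ hstn
      have hcl' : PySem.List.pyGetD cc (pvSf S L arr p) 0 = cc.getD (pvSf S L arr p).toNat 0 :=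
        pv_pyGetD_nonneg _ _ _ hs0
      rw [List.foldl_cons]
      simp only [hsf, hcl']
      rw [pv_wrap_get _ (pvN S) _ _ (by simp) hn hcs.1 hcs.2,
        pv_wrap_set _ (pvN S) _ _ (by simp) hn hcs.1 hcs.2,
        pv_map_range_getD _ _ _ _ (pv_mod_toNat_lt _ _ hn),
        pv_map_range_set,
        ih _ (fun q hq => hmem q (by simp [hq]))]
      apply pv_map_range_congr
      intro v hv
      have hkey : (PySem.Int.mod (cc.getD (pvSf S L arr p).toNat 0) ((pvN S : Nat) : Int)).toNat
          = pvKey S cc (pvSf S L arr p) := rfl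
      simp only [List.map_cons, List.filter_cons, hkey]
      by_cases h : pvKey S cc (pvSf S L arr p) = v
      · simp [h]
      · simp [h, Ne.symm h]

theorem pv_sum_indicator (k m : Nat) (hk : k < m) :
    ((List.range m).map (fun v => if k = v then 1 else 0)).sum = 1 := by
  induction m with
  | zero => omega
  | succ b ih =>
      rw [List.range_succ]
      simp only [List.map_append, List.sum_append, List.map_cons, List.map_nil]
      by_cases h : k = b
      · subst h
        have hz : ((List.range k).map (fun v => if k = v then 1 else 0)).sum = 0 := by
          apply List.sum_eq_zero
          intro x hx
          simp only [List.mem_map, List.mem_range] at hx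
          obtain ⟨i, hi, rfl⟩ := hx
          rw [if_neg (by omega)]
        simp [hz]
      · rw [if_neg h]
        simp [ih (by omega)]

theorem pv_sum_count (m : Nat) (ks : List Nat) (h : ∀ k ∈ ks, k < m) :
    ((List.range m).map (fun v => ks.countP (fun k => k == v))).sum = ks.length := by
  induction ks with
  | nil => simp
  | cons k ks ih =>
      have hk : k < m := h k (by simp)
      have hks : ∀ x ∈ ks, x < m := fun x hx => h x (by simp [hx])
      simp only [List.countP_cons]
      rw [List.sum_map_add, ih hks, List.length_cons]
      congr 1
      rw [show (fun v => if (k == v) = true then 1 else 0) = (fun v => if k = v then 1 else 0) from by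
        funext v; by_cases hv : k = v <;> simp [hv]]
      exact pv_sum_indicator k m hk

theorem pv_sum_indicator_zero (k m : Nat) (hk : m ≤ k) :
    ((List.range m).map (fun v => if k = v then 1 else 0)).sum = 0 := by
  apply List.sum_eq_zero
  intro x hx
  simp only [List.mem_map, List.mem_range] at hx
  obtain ⟨i, hi, rfl⟩ := hx
  rw [if_neg (by omega)]

theorem pv_sum_pcnt' (S : String) (cc : List Int) (hn : 0 < pvN S) :
    ((List.range (pvN S)).map (pvPcnt S cc)).sum = pvN S := by
  have h1 : ∀ v, pvPcnt S cc v
      = ((List.range (pvN S)).map (fun (i : Nat) => pvKey S cc (i : Int))).countP (fun k => k == v) := by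
    intro v
    rw [List.countP_map]
    rfl
  rw [pv_map_range_congr _ _ _ (fun v _ => h1 v), pv_sum_count]
  · simp
  · intro k hk
    simp only [List.mem_map, List.mem_range] at hk
    obtain ⟨i, _, rfl⟩ := hk
    exact pv_mod_toNat_lt _ _ hn

theorem pv_kcnt_eq (S : String) (L : Int) (arr cc : List Int) (v : Nat) :
    pvKcnt S cc v ((List.range (pvN S)).map (pvSf S L arr))
      = ((List.range (pvN S)).map (fun i => pvKey S cc (pvSf S L arr i))).countP (fun k => k == v) := by
  simp only [pvKcnt, List.countP_map]
  rfl

theorem pv_sum_kcnt (S : String) (L : Int) (arr cc : List Int) (hn : 0 < pvN S) :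
    ((List.range (pvN S)).map (fun v =>
      pvKcnt S cc v ((List.range (pvN S)).map (pvSf S L arr)))).sum = pvN S := by
  rw [pv_map_range_congr _ _ _ (fun v _ => pv_kcnt_eq S L arr cc v), pv_sum_count]
  · simp
  · intro k hk
    simp only [List.mem_map, List.mem_range] at hk
    obtain ⟨i, _, rfl⟩ := hk
    exact pv_mod_toNat_lt _ _ hn

theorem pv_flatMap_set' (m κ : Nat) (f f' : Nat → List Int) (x : Int) (t : Nat)
    (hκ : κ < m) (hne : ∀ v, v ≠ κ → f' v = f v) (hset : (f κ).set t x = f' κ)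
    (ht : t < (f κ).length) :
    ((List.range m).flatMap f).set ((((List.range κ).map (fun u => (f u).length)).sum) + t) x
      = (List.range m).flatMap f' := by
  obtain ⟨b, rfl⟩ : ∃ b, m = κ + (b + 1) := ⟨m - κ - 1, by omega⟩
  rw [List.range_add, List.range_succ_eq_map]
  simp only [List.map_cons, List.flatMap_append, List.flatMap_cons, List.map_map, Nat.add_zero]
  rw [show (((List.range κ).map (fun u => (f u).length)).sum) = ((List.range κ).flatMap f).length from
    (List.length_flatMap).symm]
  rw [pv_set_append_right, List.set_append_left _ _ ht, hset]
  congr 1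
  · rw [List.flatMap_def, List.flatMap_def]
    congr 1
    apply List.map_congr_left
    intro u hu
    exact (hne u (by simp only [List.mem_range] at hu; omega)).symm
  · congr 1
    rw [List.flatMap_def, List.flatMap_def]
    congr 1
    apply List.map_congr_left
    intro u hu
    simp only [List.mem_map, List.mem_range] at hu
    obtain ⟨w, hw, rfl⟩ := hu
    exact (hne _ (by simp only [Function.comp_apply]; omega)).symm

theorem pv_cum_le (S : String) (cc : List Int) (hn : 0 < pvN S) (κ : Nat) (hκ : κ < pvN S) :
    pvCum S cc κ ≤ pvN S := by
  obtain ⟨b, hb⟩ : ∃ b, pvN S = (κ + 1) + b := ⟨pvN S - (κ + 1), by omega⟩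
  conv_rhs => rw [← pv_sum_pcnt' S cc hn, hb, List.range_add, List.map_append, List.sum_append]
  rw [pvCum]
  omega

theorem pv_chunk_length (S : String) (cc : List Int) (m : Nat → Nat) (l : List Int) (v : Nat)
    (h : pvKcnt S cc v l ≤ m v) :
    (pvChunk S cc m l v).length = m v := by
  simp only [pvChunk, List.length_append, List.length_replicate, ← List.countP_eq_length_filter]
  have h2 : l.countP (fun s => pvKey S cc s == v) = pvKcnt S cc v l := rfl
  omega

theorem pv_flatMap_congr (m : Nat) (f g : Nat → List Int) (h : ∀ v < m, f v = g v) :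
    (List.range m).flatMap f = (List.range m).flatMap g := by
  rw [List.flatMap_def, List.flatMap_def]
  exact congrArg List.flatten (pv_map_range_congr m f g h)

theorem pv_scatter_loop (S : String) (L : Int) (arr cc : List Int)
    (hn : 0 < pvN S)
    (hcl : ∀ i < pvN S, -(pvN S : Int) ≤ cc.getD i 0 ∧ cc.getD i 0 < (pvN S : Int))
    (m : Nat → Nat)
    (hm3 : ((List.range (pvN S)).map m).sum = pvN S)
    (hm2 : ∀ v, v < pvN S → 0 < m v → pvCum S cc v = ((List.range (v + 1)).map m).sum) :
    ∀ (I : List Nat), (∀ i ∈ I, i < pvN S) →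
      (∀ v, v < pvN S → pvKcnt S cc v (I.map (pvSf S L arr)) ≤ m v) →
      I.foldr (fun (i : Nat) (p : List Int × List Int) =>
          (PySem.List.pySetD p.1
              (PySem.List.pyGetD cc (PySem.Int.mod (PySem.List.pyGetD arr (i : Int) 0 - L + ((pvN S : Nat) : Int)) ((pvN S : Nat) : Int)) 0)
              (PySem.List.pyGetD p.1
                (PySem.List.pyGetD cc (PySem.Int.mod (PySem.List.pyGetD arr (i : Int) 0 - L + ((pvN S : Nat) : Int)) ((pvN S : Nat) : Int)) 0) 0 - 1),
           PySem.List.pySetD p.2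
              (PySem.List.pyGetD
                (PySem.List.pySetD p.1
                  (PySem.List.pyGetD cc (PySem.Int.mod (PySem.List.pyGetD arr (i : Int) 0 - L + ((pvN S : Nat) : Int)) ((pvN S : Nat) : Int)) 0)
                  (PySem.List.pyGetD p.1
                    (PySem.List.pyGetD cc (PySem.Int.mod (PySem.List.pyGetD arr (i : Int) 0 - L + ((pvN S : Nat) : Int)) ((pvN S : Nat) : Int)) 0) 0 - 1))
                (PySem.List.pyGetD cc (PySem.Int.mod (PySem.List.pyGetD arr (i : Int) 0 - L + ((pvN S : Nat) : Int)) ((pvN S : Nat) : Int)) 0) 0)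
              (PySem.Int.mod (PySem.List.pyGetD arr (i : Int) 0 - L + ((pvN S : Nat) : Int)) ((pvN S : Nat) : Int))))
        ((List.range (pvN S)).map (fun v => (pvCum S cc v : Int)), List.replicate (pvN S) (0 : Int))
      = ((List.range (pvN S)).map
            (fun v => (pvCum S cc v : Int) - (pvKcnt S cc v (I.map (pvSf S L arr)) : Int)),
         (List.range (pvN S)).flatMap (pvChunk S cc m (I.map (pvSf S L arr)))) := by
  intro I
  induction I with
  | nil =>
      intro _ _
      rw [List.foldr_nil]
      simp only [List.map_nil, Prod.mk.injEq]
      refine ⟨?_, ?_⟩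
      · apply pv_map_range_congr
        intro v hv
        simp [pvKcnt]
      · rw [pv_flatMap_congr (pvN S) _ (fun v => List.replicate (m v) 0)
          (fun v hv => by simp [pvChunk, pvKcnt]),
          pv_flatMap_replicate, hm3]
  | cons i I ih =>
      intro hmem hle
      have hmemI : ∀ j ∈ I, j < pvN S := fun j hj => hmem j (by simp [hj])
      have hleI : ∀ v, v < pvN S → pvKcnt S cc v (I.map (pvSf S L arr)) ≤ m v := by
        intro v hv
        refine le_trans ?_ (hle v hv)
        simp only [List.map_cons, pvKcnt, List.countP_cons]
        omega
      rw [List.foldr_cons, ih hmemI hleI]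
      have hi : i < pvN S := hmem i (by simp)
      have hstart : PySem.Int.mod (PySem.List.pyGetD arr (i : Int) 0 - L + ((pvN S : Nat) : Int)) ((pvN S : Nat) : Int)
          = pvSf S L arr i := by
        have hg : PySem.List.pyGetD arr (i : Int) 0 = arr.getD i 0 := by
          simp [List.getD_eq_getElem?_getD]
        rw [hg]
        exact pv_mod_add_self _ _ hn
      rw [hstart]
      have hs0 : 0 ≤ pvSf S L arr i := pv_sf_nonneg S L arr hn i
      have hsn : pvSf S L arr i < (pvN S : Int) := pv_sf_lt S L arr hn i
      have hstn : (pvSf S L arr i).toNat < pvN S := by omega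
      have hcs := hcl _ hstn
      rw [pv_pyGetD_nonneg cc _ 0 hs0]
      have hκeq : (PySem.Int.mod (cc.getD (pvSf S L arr i).toNat 0) ((pvN S : Nat) : Int)).toNat
          = pvKey S cc (pvSf S L arr i) := rfl
      have hκlt : (PySem.Int.mod (cc.getD (pvSf S L arr i).toNat 0) ((pvN S : Nat) : Int)).toNat < pvN S :=
        pv_mod_toNat_lt _ _ hn
      rw [pv_wrap_get _ (pvN S) _ _ (by simp) hn hcs.1 hcs.2,
        pv_map_range_getD _ _ _ _ hκlt,
        pv_wrap_set _ (pvN S) _ _ (by simp) hn hcs.1 hcs.2,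
        pv_map_range_set,
        pv_wrap_get _ (pvN S) _ _ (by simp) hn hcs.1 hcs.2,
        pv_map_range_getD _ _ _ _ hκlt,
        if_pos rfl]
      rw [hκeq]
      have hκn : pvKey S cc (pvSf S L arr i) < pvN S := hκeq ▸ hκlt
      have hkc : pvKcnt S cc (pvKey S cc (pvSf S L arr i)) ((i :: I).map (pvSf S L arr))
          = pvKcnt S cc (pvKey S cc (pvSf S L arr i)) (I.map (pvSf S L arr)) + 1 := by
        simp [pvKcnt, List.countP_cons]
      have hkcle : pvKcnt S cc (pvKey S cc (pvSf S L arr i)) ((i :: I).map (pvSf S L arr))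
          ≤ m (pvKey S cc (pvSf S L arr i)) := hle _ hκn
      have hmpos : 0 < m (pvKey S cc (pvSf S L arr i)) := by omega
      have hcum : pvCum S cc (pvKey S cc (pvSf S L arr i))
          = ((List.range (pvKey S cc (pvSf S L arr i) + 1)).map m).sum := hm2 _ hκn hmpos
      have hsplitm : ((List.range (pvKey S cc (pvSf S L arr i) + 1)).map m).sum
          = ((List.range (pvKey S cc (pvSf S L arr i))).map m).sum
            + m (pvKey S cc (pvSf S L arr i)) := by
        rw [List.range_succ]; simp
      have hpc : m (pvKey S cc (pvSf S L arr i))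
          ≤ pvCum S cc (pvKey S cc (pvSf S L arr i)) := by omega
      have hcumn : pvCum S cc (pvKey S cc (pvSf S L arr i)) ≤ pvN S := pv_cum_le S cc hn _ hκn
      simp only [Prod.mk.injEq]
      refine ⟨?_, ?_⟩
      · apply pv_map_range_congr
        intro v hv
        simp only [List.map_cons, pvKcnt, List.countP_cons]
        by_cases hvκ : v = pvKey S cc (pvSf S L arr i)
        · rw [if_pos hvκ,
            show ((pvKey S cc (pvSf S L arr i) == v) : Bool) = true from beq_iff_eq.mpr hvκ.symm,
            hvκ]
          simp only [if_true]
          push_cast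
          ring
        · rw [if_neg hvκ,
            show ((pvKey S cc (pvSf S L arr i) == v) : Bool) = false from
              beq_eq_false_iff_ne.mpr (fun hh => hvκ hh.symm)]
          simp
      · have hw : ((pvCum S cc (pvKey S cc (pvSf S L arr i)) : Int)
              - (pvKcnt S cc (pvKey S cc (pvSf S L arr i)) (I.map (pvSf S L arr)) : Int) - 1)
            = ((pvCum S cc (pvKey S cc (pvSf S L arr i))
                - pvKcnt S cc (pvKey S cc (pvSf S L arr i)) ((i :: I).map (pvSf S L arr)) : Nat) : Int) := by
          omega
        rw [hw, PySem.List.pySetD_natCast]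
        have hsum : ((List.range (pvKey S cc (pvSf S L arr i))).map
              (fun u => (pvChunk S cc m (I.map (pvSf S L arr)) u).length)).sum
            = ((List.range (pvKey S cc (pvSf S L arr i))).map m).sum := by
          apply congrArg
          apply List.map_congr_left
          intro u hu
          exact pv_chunk_length S cc m _ u (hleI u (by simp only [List.mem_range] at hu; omega))
        have hidx : pvCum S cc (pvKey S cc (pvSf S L arr i))
              - pvKcnt S cc (pvKey S cc (pvSf S L arr i)) ((i :: I).map (pvSf S L arr))
            = ((List.range (pvKey S cc (pvSf S L arr i))).map
                (fun u => (pvChunk S cc m (I.map (pvSf S L arr)) u).length)).sum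
              + (m (pvKey S cc (pvSf S L arr i))
                - pvKcnt S cc (pvKey S cc (pvSf S L arr i)) ((i :: I).map (pvSf S L arr))) := by
          rw [hsum]
          omega
        rw [hidx]
        apply pv_flatMap_set' (pvN S) (pvKey S cc (pvSf S L arr i)) _ _ _ _ hκn
        · intro v hv
          simp only [pvChunk, pvKcnt, List.map_cons, List.countP_cons, List.filter_cons]
          rw [show ((pvKey S cc (pvSf S L arr i) == v) : Bool) = false from
            beq_eq_false_iff_ne.mpr (fun hh => hv hh.symm)]
          simp
        · rw [show m (pvKey S cc (pvSf S L arr i))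
                - pvKcnt S cc (pvKey S cc (pvSf S L arr i)) ((i :: I).map (pvSf S L arr))
              = (m (pvKey S cc (pvSf S L arr i))
                - pvKcnt S cc (pvKey S cc (pvSf S L arr i)) (I.map (pvSf S L arr))) - 1 from by omega]
          rw [pvChunk, pv_replicate_set _ (by omega) _ _]
          simp only [pvChunk, List.map_cons, List.filter_cons]
          rw [show ((pvKey S cc (pvSf S L arr i) == pvKey S cc (pvSf S L arr i)) : Bool) = true from
            beq_iff_eq.mpr rfl]
          rw [show pvKcnt S cc (pvKey S cc (pvSf S L arr i))
                (pvSf S L arr i :: I.map (pvSf S L arr))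
              = pvKcnt S cc (pvKey S cc (pvSf S L arr i)) (I.map (pvSf S L arr)) + 1 from by
            simp [pvKcnt, List.countP_cons]]
          rw [show m (pvKey S cc (pvSf S L arr i))
                - (pvKcnt S cc (pvKey S cc (pvSf S L arr i)) (I.map (pvSf S L arr)) + 1)
              = m (pvKey S cc (pvSf S L arr i))
                - pvKcnt S cc (pvKey S cc (pvSf S L arr i)) (I.map (pvSf S L arr)) - 1 from by omega]
          simp
        · rw [pv_chunk_length S cc m _ _ (hleI _ hκn)]
          omega


theorem pv_len_eq (S : String) : PySem.Str.len S = ((pvN S : Nat) : Int) := by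
  simp [pvN, PySem.Str.len_eq]

theorem pv_A_eq (S : String) (L : Int) (arr cc : List Int)
    (hn : 0 < pvN S)
    (hcl : ∀ i < pvN S, -(pvN S : Int) ≤ cc.getD i 0 ∧ cc.getD i 0 < (pvN S : Int))
    (hm2 : ∀ v, v < pvN S → 0 < pvKcnt S cc v ((List.range (pvN S)).map (pvSf S L arr)) →
      pvCum S cc v = ((List.range (v + 1)).map (fun u => pvKcnt S cc u ((List.range (pvN S)).map (pvSf S L arr)))).sum) :
    double_suffix_sort_py S L arr cc
      = (List.range (pvN S)).flatMap
          (fun v => ((List.range (pvN S)).map (pvSf S L arr)).filter (fun s => pvKey S cc s == v)) := by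
  have hrep0 : List.replicate (pvN S) (0 : Int) = (List.range (pvN S)).map (fun _ => (0 : Int)) := by
    rw [List.map_const', List.length_range]
  have h1 : (PySem.List.pyRange 0 ((pvN S : Nat) : Int) 1).foldl
      (fun num i => PySem.List.pySetD num (PySem.List.pyGetD cc i 0)
        (PySem.List.pyGetD num (PySem.List.pyGetD cc i 0) 0 + 1))
      (List.replicate (pvN S) (0 : Int))
      = (List.range (pvN S)).map (fun v => (pvPcnt S cc v : Int)) := by
    rw [PySem.List.pyRange_zero_nat, List.foldl_map, hrep0]
    refine Eq.trans (pv_count_loop S cc hn hcl (List.range (pvN S)) (fun _ => 0)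
      (fun p hp => List.mem_range.mp hp)) ?_
    apply pv_map_range_congr
    intro v hv
    rw [zero_add]
    rfl
  have h2 : (PySem.List.pyRange 1 ((pvN S : Nat) : Int) 1).foldl
      (fun num j => PySem.List.pySetD num j
        (PySem.List.pyGetD num j 0 + PySem.List.pyGetD num (j - 1) 0))
      ((List.range (pvN S)).map (fun v => (pvPcnt S cc v : Int)))
      = (List.range (pvN S)).map (fun v => (pvCum S cc v : Int)) := by
    refine Eq.trans (pv_cum_loop S (fun v => (pvPcnt S cc v : Int)) hn (pvN S) le_rfl) ?_
    apply pv_map_range_congr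
    intro v hv
    rw [if_pos (by omega), pvCum, Nat.cast_list_sum, List.map_map]
    rfl
  have h3 : ((PySem.List.pyRange (((pvN S : Nat) : Int) - 1) (-1) (-1)).foldl
      (fun p i =>
        (PySem.List.pySetD p.1
            (PySem.List.pyGetD cc (PySem.Int.mod (PySem.List.pyGetD arr i 0 - L + ((pvN S : Nat) : Int)) ((pvN S : Nat) : Int)) 0)
            (PySem.List.pyGetD p.1
              (PySem.List.pyGetD cc (PySem.Int.mod (PySem.List.pyGetD arr i 0 - L + ((pvN S : Nat) : Int)) ((pvN S : Nat) : Int)) 0) 0 - 1),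
         PySem.List.pySetD p.2
            (PySem.List.pyGetD
              (PySem.List.pySetD p.1
                (PySem.List.pyGetD cc (PySem.Int.mod (PySem.List.pyGetD arr i 0 - L + ((pvN S : Nat) : Int)) ((pvN S : Nat) : Int)) 0)
                (PySem.List.pyGetD p.1
                  (PySem.List.pyGetD cc (PySem.Int.mod (PySem.List.pyGetD arr i 0 - L + ((pvN S : Nat) : Int)) ((pvN S : Nat) : Int)) 0) 0 - 1))
              (PySem.List.pyGetD cc (PySem.Int.mod (PySem.List.pyGetD arr i 0 - L + ((pvN S : Nat) : Int)) ((pvN S : Nat) : Int)) 0) 0)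
            (PySem.Int.mod (PySem.List.pyGetD arr i 0 - L + ((pvN S : Nat) : Int)) ((pvN S : Nat) : Int))))
      ((List.range (pvN S)).map (fun v => (pvCum S cc v : Int)), List.replicate (pvN S) (0 : Int))).2
      = (List.range (pvN S)).flatMap
          (fun v => ((List.range (pvN S)).map (pvSf S L arr)).filter (fun s => pvKey S cc s == v)) := by
    rw [PySem.List.pyRange_neg_one_eq_reverse,
      show ((-1 : Int) + 1) = 0 from by norm_num,
      show (((pvN S : Nat) : Int) - 1 + 1) = ((pvN S : Nat) : Int) from by ring,
      PySem.List.pyRange_zero_nat, ← List.map_reverse, List.foldl_map, List.foldl_reverse]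
    refine Eq.trans (congrArg Prod.snd (pv_scatter_loop S L arr cc hn hcl
      (fun u => pvKcnt S cc u ((List.range (pvN S)).map (pvSf S L arr)))
      (pv_sum_kcnt S L arr cc hn) hm2 (List.range (pvN S))
      (fun i hi => List.mem_range.mp hi) (fun v hv => le_rfl))) ?_
    apply pv_flatMap_congr
    intro v hv
    simp [pvChunk]
  simp only [double_suffix_sort_py, pv_len_eq S, Int.toNat_natCast]
  rw [h1, h2]
  exact h3

theorem pv_B_eq (S : String) (L : Int) (arr cc : List Int)
    (hn : 0 < pvN S)
    (hcl : ∀ i < pvN S, -(pvN S : Int) ≤ cc.getD i 0 ∧ cc.getD i 0 < (pvN S : Int)) :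
    double_suffix_sort_py_alt S L arr cc
      = (List.range (pvN S)).flatMap
          (fun v => ((List.range (pvN S)).map (pvSf S L arr)).filter (fun s => pvKey S cc s == v)) := by
  simp only [double_suffix_sort_py_alt, pv_len_eq S, Int.toNat_natCast]
  rw [PySem.List.foldl_append_eq_flatten, List.nil_append,
    PySem.List.pyRange_zero_nat, List.foldl_map,
    show List.replicate (pvN S) ([] : List Int) = (List.range (pvN S)).map (fun _ => ([] : List Int)) from by
      rw [List.map_const', List.length_range]]
  have hb := pv_bucket_loop S L arr cc hn hcl (List.range (pvN S)) (fun _ => [])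
    (fun p hp => List.mem_range.mp hp)
  have h2 : ((List.range (pvN S)).map (fun v => ([] : List Int)
        ++ (((List.range (pvN S)).map (pvSf S L arr)).filter (fun s => pvKey S cc s == v)))).flatten
      = (List.range (pvN S)).flatMap
          (fun v => ((List.range (pvN S)).map (pvSf S L arr)).filter (fun s => pvKey S cc s == v)) := by
    rw [← List.flatMap_def]
    exact pv_flatMap_congr _ _ _ (fun v hv => by simp)
  exact Eq.trans (congrArg List.flatten hb) h2

theorem pv_take_eq (xs : List Int) (n : Nat) (h : n ≤ xs.length) :
    xs.take n = (List.range n).map (fun i => xs.getD i 0) := by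
  apply List.ext_getElem
  · simp [h]
  · intro i h1 h2
    simp only [List.length_take] at h1
    rw [List.getElem_take, List.getElem_map, List.getElem_range,
      List.getD_eq_getElem?_getD, List.getElem?_eq_getElem (by omega), Option.getD_some]

theorem pv_le_toNat (x : Int) (v : Nat) (hx : 0 ≤ x) :
    (decide (x.toNat ≤ v)) = (decide (x ≤ (v : Int))) := by
  by_cases h : x ≤ (v : Int)
  · simp only [h, decide_true]
    rw [decide_eq_true_eq]
    omega
  · simp only [h, decide_false]
    rw [decide_eq_false_iff_not]
    omega

theorem pv_countP_cum2 {α : Type} (l : List α) (f : α → Nat) (v : Nat) :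
    ((List.range (v + 1)).map (fun u => l.countP (fun x => f x == u))).sum
      = l.countP (fun x => f x ≤ v) := by
  induction l with
  | nil => simp
  | cons a l ih =>
      simp only [List.countP_cons]
      rw [List.sum_map_add, ih]
      congr 1
      rw [show (fun u => if (f a == u) = true then 1 else 0)
          = (fun u => if f a = u then 1 else 0) from by
        funext u; by_cases hu : f a = u <;> simp [hu]]
      by_cases h : f a ≤ v
      · rw [pv_sum_indicator (f a) (v + 1) (by omega)]
        simp [h]
      · rw [pv_sum_indicator_zero (f a) (v + 1) (by omega)]
        simp [h]

theorem pv_cum_eq_countP (S : String) (cc : List Int) (v : Nat) :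
    pvCum S cc v = (List.range (pvN S)).countP (fun (i : Nat) => pvKey S cc (i : Int) ≤ v) :=
  pv_countP_cum2 (List.range (pvN S)) (fun (i : Nat) => pvKey S cc (i : Int)) v

theorem pv_mcum_eq_countP (S : String) (L : Int) (arr cc : List Int) (v : Nat) :
    ((List.range (v + 1)).map (fun u =>
        pvKcnt S cc u ((List.range (pvN S)).map (pvSf S L arr)))).sum
      = ((List.range (pvN S)).map (pvSf S L arr)).countP (fun s => pvKey S cc s ≤ v) :=
  pv_countP_cum2 ((List.range (pvN S)).map (pvSf S L arr)) (pvKey S cc) v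

theorem pv_match (S : String) (L : Int) (arr cc : List Int)
    (hn : 0 < pvN S) (ha : pvN S ≤ arr.length) (hcc : pvN S ≤ cc.length)
    (hD : ∀ k ∈ pvKsI S L arr cc,
      (cc.take S.length).countP (PySem.Int.mod · S.length ≤ k)
        = (pvKsI S L arr cc).countP (· ≤ k)) :
    ∀ v, v < pvN S → 0 < pvKcnt S cc v ((List.range (pvN S)).map (pvSf S L arr)) →
      pvCum S cc v = ((List.range (v + 1)).map (fun u => pvKcnt S cc u ((List.range (pvN S)).map (pvSf S L arr)))).sum := by
  simp only [pvKsI] at hD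
  have hKs : (arr.take S.length).map (fun a =>
        PySem.Int.mod (cc.getD (PySem.Int.mod (a - L) (S.length : Int)).toNat 0) (S.length : Int))
      = (List.range (pvN S)).map (fun i => ((pvKey S cc (pvSf S L arr i) : Nat) : Int)) := by
    rw [pv_take_eq arr S.length ha, List.map_map]
    apply pv_map_range_congr
    intro i hi
    simp only [Function.comp, pvKey, pvSf, pvN]
    rw [Int.toNat_of_nonneg (PySem.Int.mod_nonneg _ (by exact_mod_cast hn))]
  rw [hKs] at hD
  intro v hv hm
  have hvmem : ((v : Nat) : Int) ∈ (List.range (pvN S)).map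
      (fun i => ((pvKey S cc (pvSf S L arr i) : Nat) : Int)) := by
    simp only [pvKcnt] at hm
    obtain ⟨st, hst, hp⟩ := List.countP_pos_iff.mp hm
    simp only [List.mem_map, List.mem_range] at hst
    obtain ⟨i, hi, rfl⟩ := hst
    rw [beq_iff_eq] at hp
    exact List.mem_map.mpr ⟨i, List.mem_range.mpr hi, by rw [hp]⟩
  have hDv := hD _ hvmem
  have hL : (cc.take S.length).countP
        (fun c => decide (PySem.Int.mod c (S.length : Int) ≤ ((v : Nat) : Int)))
      = pvCum S cc v := by
    rw [pv_take_eq cc S.length hcc, List.countP_map, pv_cum_eq_countP]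
    apply List.countP_congr
    intro i _
    simp only [Function.comp, pvKey, pvN, Int.toNat_natCast]
    rw [← pv_le_toNat _ v (PySem.Int.mod_nonneg _ (by exact_mod_cast hn))]
    rfl
  have hR : ((List.range (pvN S)).map
        (fun i => ((pvKey S cc (pvSf S L arr i) : Nat) : Int))).countP
        (fun x => decide (x ≤ ((v : Nat) : Int)))
      = ((List.range (v + 1)).map (fun u => pvKcnt S cc u ((List.range (pvN S)).map (pvSf S L arr)))).sum := by
    rw [List.countP_map, pv_mcum_eq_countP, List.countP_map]
    apply List.countP_congr
    intro i _
    simp only [Function.comp]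
    rw [show (decide (((pvKey S cc (pvSf S L arr i) : Nat) : Int) ≤ ((v : Nat) : Int)))
        = (decide (pvKey S cc (pvSf S L arr i) ≤ v)) from by
      simp]
  rw [← hL, hDv, hR]

theorem pv_main (S : String) (L : Int) (arrangement class_characters : List Int)
    (hpre : Pre_double_suffix_sort_py S L arrangement class_characters) :
    double_suffix_sort_py S L arrangement class_characters
      = double_suffix_sort_py_alt S L arrangement class_characters := by
  by_cases hn : pvN S = 0
  · have hS : S.length = 0 := hn
    simp [double_suffix_sort_py, double_suffix_sort_py_alt, hS, PySem.Str.len_eq,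
      PySem.List.pyRange_one_eq_nil, PySem.List.pyRange_neg_one_eq_nil]
  · have hn' : 0 < pvN S := Nat.pos_of_ne_zero hn
    obtain ⟨ha, hc, hcl, hD⟩ := hpre
    exact (pv_A_eq S L arrangement class_characters hn' hcl
        (pv_match S L arrangement class_characters hn' ha hc hD)).trans
      (pv_B_eq S L arrangement class_characters hn' hcl).symm

-- ===== VERDICT (by name: the statement is the Claim_ definition above) =====
theorem double_suffix_sort_py_spec : Claim_equal_double_suffix_sort_py := by
  intro S L arrangement class_characters hdom hpre
  exact pv_main S L arrangement class_characters hpre
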